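-- pv_equiv track=rewrite | github.com/gsaslan2001-blip/xxq | scripts/notebooklm-exhaust.py | classify_anchors
-- ===== SOURCE A (Python) =====
-- def classify_anchors(anchors, questions):
--     """
--     Her çapayı soruların KÖKLERİ üzerinden kontrol eder.
--     Şıklar (option_a..e) SAYILMAZ — sadece soru kökü + açıklama.
--
--     Bir çapa "sorgulanmış" sayılır eğer çapadaki anlamlı kelimelerin
--     (3+ karakter) %60+'ı herhangi bir sorunun kökünde geçiyorsa.
--
--     Returns: (covered: list[str], uncovered: list[str])
--     """
--     if not anchors:
--         return [], []
--     if not questions: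
--         return [], list(anchors)
--
--     # Sadece soru kökleri + açıklamalar (şıklar HARİÇ!)
--     stem_corpus = ""
--     for q in questions:
--         stem = (q.get("question", "") or "").lower()
--         explanation = (q.get("explanation", "") or "").lower()
--         stem_corpus += " " + stem + " " + explanation
--
--     covered = []
--     uncovered = []
--
--     for anchor in anchors:
--         words = [w.lower() for w in anchor.split() if len(w) >= 3]
--         if not words:
--             uncovered.append(anchor)
--             continue
--
--         match_count = sum(1 for w in words if w in stem_corpus)
--         match_ratio = match_count / len(words)
--
--         if match_ratio >= 0.60:
--             covered.append(anchor)
--         else: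
--             uncovered.append(anchor)
--
--     return covered, uncovered
-- ===== SOURCE B (Python) =====
-- def classify_anchors(anchors, questions):
--     """Index the corpus once (all substrings of each needed length), then each
--     word test is a pure lookup; the corpus is never scanned per word."""
--     if not anchors:
--         return [], []
--     if not questions:
--         return [], list(anchors)
--
--     parts = []
--     for q in questions:
--         parts.append(" " + (q.get("question", "") or "").lower())
--         parts.append(" " + (q.get("explanation", "") or "").lower())
--     corpus = "".join(parts)
--     n = len(corpus)
--
--     word_lists = [[w.lower() for w in a.split() if len(w) >= 3] for a in anchors]
--     lengths = {len(w) for ws in word_lists for w in ws}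
--     index = {}
--     for L in lengths:
--         index[L] = {corpus[i:i + L] for i in range(n - L + 1)}
--
--     covered, uncovered = [], []
--     for a, ws in zip(anchors, word_lists):
--         if ws and 5 * sum(w in index[len(w)] for w in ws) >= 3 * len(ws):
--             covered.append(a)
--         else:
--             uncovered.append(a)
--     return covered, uncovered
-- ===== Notes on version B (the rewrite author's own statement) =====
-- stated objective: alternative
-- what changed: B inverts the direction of the search: instead of scanning the corpus once per word (A's 'w in stem_corpus'), it indexes the corpus up front - for every needed word length it enumerates all corpus substrings of that length into a set - so each word test is a pure hash-set lookup and the corpus is never scanned per pattern.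
import Mathlib
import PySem

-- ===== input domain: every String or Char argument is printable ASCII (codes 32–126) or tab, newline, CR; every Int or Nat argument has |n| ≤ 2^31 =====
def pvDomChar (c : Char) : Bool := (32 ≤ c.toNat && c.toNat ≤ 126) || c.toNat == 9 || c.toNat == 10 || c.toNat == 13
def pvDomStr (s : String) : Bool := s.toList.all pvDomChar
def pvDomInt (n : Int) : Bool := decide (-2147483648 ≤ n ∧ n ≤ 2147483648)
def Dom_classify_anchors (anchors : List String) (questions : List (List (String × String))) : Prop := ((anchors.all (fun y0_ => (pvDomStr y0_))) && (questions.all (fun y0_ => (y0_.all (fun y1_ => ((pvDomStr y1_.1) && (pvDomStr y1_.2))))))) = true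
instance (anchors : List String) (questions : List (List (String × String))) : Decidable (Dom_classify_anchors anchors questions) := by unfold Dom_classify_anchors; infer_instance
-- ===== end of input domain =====

-- B indexes the corpus once — for every needed word length it enumerates ALL corpus
-- substrings of that length into a set — so each word test is a pure set lookup and the
-- corpus is never scanned per word (objective: alternative).


-- ===== PORT A =====
-- literal transliteration of A; the float test 'match_count/len(words) >= 0.60' is written as
-- the integer comparison '3*len ≤ 5*match_count', exact for the list lengths the domain reaches
def classify_anchors (anchors : List String) (questions : List (List (String × String))) : List String × List String :=
  if anchors = [] then ([], [])
  else if questions = [] then ([], anchors)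
  else
    let corpus := questions.foldl (fun acc q =>
      acc ++ " " ++ PySem.Str.lower (PySem.Dict.getD (PySem.Dict.mk q) "question" "")
          ++ " " ++ PySem.Str.lower (PySem.Dict.getD (PySem.Dict.mk q) "explanation" "")) ""
    anchors.foldl (fun acc anchor =>
      let words := ((PySem.Str.split₀ anchor).filter (fun w => 3 ≤ PySem.Str.len w)).map PySem.Str.lower
      if words = [] then (acc.1, acc.2 ++ [anchor])
      else
        let mc := words.countP (fun w => PySem.Str.isIn w corpus)
        if 3 * words.length ≤ 5 * mc then (acc.1 ++ [anchor], acc.2)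
        else (acc.1, acc.2 ++ [anchor])) ([], [])

-- ===== PORT B =====
def pvPieceQ (q : List (String × String)) : String :=
  " " ++ PySem.Str.lower (PySem.Dict.getD (PySem.Dict.mk q) "question" "")
def pvPieceE (q : List (String × String)) : String :=
  " " ++ PySem.Str.lower (PySem.Dict.getD (PySem.Dict.mk q) "explanation" "")

def pvWordsB (a : String) : List String :=
  ((PySem.Str.split₀ a).filter (fun w => 3 ≤ PySem.Str.len w)).map PySem.Str.lower

-- {corpus[i:i+L] for i in range(n - L + 1)}
def pvSubstrs (corpus : String) (n L : Int) : PySem.Set String :=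
  PySem.Set.ofList ((PySem.List.pyRange 0 (n - L + 1) 1).map
    (fun i => PySem.Str.slice corpus (some i) (some (i + L))))

-- the final classification loop of Source B, with the index as a parameter
def pvClassifyLoop (pairs : List (String × List String)) (index : PySem.Dict Int (PySem.Set String)) : List String × List String :=
  pairs.foldl (fun acc p =>
      if p.2 ≠ [] ∧ 3 * p.2.length ≤ 5 * p.2.countP
          (fun w => PySem.Set.contains (PySem.Dict.getD index (PySem.Str.len w) PySem.Set.empty) w)
      then (acc.1 ++ [p.1], acc.2)
      else (acc.1, acc.2 ++ [p.1])) (([], []) : List String × List String)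

def classify_anchors_alt (anchors : List String) (questions : List (List (String × String))) : List String × List String :=
  if anchors = [] then ([], [])
  else if questions = [] then ([], anchors)
  else
    let parts := questions.foldl (fun acc q => acc ++ [pvPieceQ q] ++ [pvPieceE q]) []
    let corpus := PySem.Str.join "" parts
    let n := PySem.Str.len corpus
    let wordLists := anchors.map pvWordsB
    let lengths : PySem.Set Int := PySem.Set.ofList (wordLists.flatMap (fun ws => ws.map PySem.Str.len))
    -- index[L] = set of all corpus substrings of length L; 'index[len(w)]' never misses a key
    -- (len(w) ∈ lengths by construction), so the total getD is exact here
    let index : PySem.Dict Int (PySem.Set String) := lengths.foldl (fun d L => PySem.Dict.insert d L (pvSubstrs corpus n L)) (PySem.Dict.empty : PySem.Dict Int (PySem.Set String))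
    pvClassifyLoop (anchors.zip wordLists) index

-- ===== PRECONDITION & SPEC =====
def Spec_classify_anchors (anchors : List String) (questions : List (List (String × String))) (out : List String × List String) : Prop := out = classify_anchors_alt anchors questions
instance (anchors : List String) (questions : List (List (String × String))) (out : List String × List String) : Decidable (Spec_classify_anchors anchors questions out) := by unfold Spec_classify_anchors; infer_instance

-- ===== CLAIM (what is proved, stated in full; the proofs are below) =====
def Claim_equal_classify_anchors : Prop := ∀ (anchors : List String) (questions : List (List (String × String))), Dom_classify_anchors anchors questions → Spec_classify_anchors anchors questions (classify_anchors anchors questions)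

-- ===== LEMMAS AND PROOFS =====

-- A's running concatenation, viewed on .toList, flattens B's per-question pieces
theorem pvCorpusA_toList (qs : List (List (String × String))) (init : String) :
    (qs.foldl (fun acc q =>
      acc ++ " " ++ PySem.Str.lower (PySem.Dict.getD (PySem.Dict.mk q) "question" "")
          ++ " " ++ PySem.Str.lower (PySem.Dict.getD (PySem.Dict.mk q) "explanation" "")) init).toList
    = init.toList ++ (qs.map (fun q => (pvPieceQ q).toList ++ (pvPieceE q).toList)).flatten := by
  induction qs generalizing init with
  | nil => simp
  | cons q qs ih => simp [ih, pvPieceQ, pvPieceE]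

theorem pvJoin_nil_toList (parts : List String) :
    (PySem.Str.join "" parts).toList = (parts.map String.toList).flatten := by
  rw [PySem.Str.toList_join]
  show List.intercalate [] _ = _
  generalize parts.map String.toList = l
  induction l with
  | nil => simp [List.intercalate]
  | cons x xs ih =>
    cases xs with
    | nil => simp [List.intercalate]
    | cons y ys =>
      simp only [List.intercalate, List.intersperse] at ih ⊢
      simp [ih]

-- lookup in the length-indexed dict: the inserted value is a function of the key
theorem pvGetD_indexFold (f : Int → PySem.Set String) (Ls : List Int)
    (d : PySem.Dict Int (PySem.Set String)) (k : Int) :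
    (Ls.foldl (fun d L => d.insert L (f L)) d).getD k PySem.Set.empty
    = if k ∈ Ls then f k else d.getD k PySem.Set.empty := by
  induction Ls generalizing d with
  | nil => simp
  | cons L Ls ih =>
    simp only [List.foldl_cons, ih, PySem.Dict.getD_insert, List.mem_cons]
    by_cases h1 : k ∈ Ls <;> by_cases h2 : k = L <;> simp [h1, h2]

-- the indexed lookup IS the substring test
theorem pvContains_substrs (c w : String) :
    PySem.Set.contains (pvSubstrs c (PySem.Str.len c) (PySem.Str.len w)) w
    = PySem.Str.isIn w c := by
  rw [Bool.eq_iff_iff, PySem.Set.contains_iff, PySem.Str.isIn_iff_infix]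
  unfold pvSubstrs
  rw [PySem.Set.mem_ofList]
  simp only [List.mem_map, PySem.List.mem_pyRange_one, PySem.Str.len_eq]
  constructor
  · rintro ⟨i, ⟨hi0, _⟩, h⟩
    rw [← h, PySem.Str.toList_slice, PySem.Chars.slice_eq_listSlice,
        PySem.List.slice_toNat _ hi0 (by positivity)]
    exact (List.take_prefix _ _).isInfix.trans (List.drop_suffix _ _).isInfix
  · rintro ⟨s, t, hst⟩
    have hlen := congrArg List.length hst
    simp only [List.length_append] at hlen
    refine ⟨(s.length : Int), ⟨by positivity, by omega⟩, ?_⟩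
    apply String.toList_inj.mp
    rw [PySem.Str.toList_slice, PySem.Chars.slice_eq_listSlice,
        PySem.List.slice_toNat _ (by positivity) (by positivity)]
    have h1 : ((s.length : Int) + (w.toList.length : Int)).toNat - ((s.length : Int)).toNat
        = w.toList.length := by omega
    rw [h1, ← hst, List.append_assoc]
    simp only [Int.toNat_natCast]
    rw [List.drop_left, List.take_left]

-- the two classification folds agree when the substring test and B's test agree on every word
theorem pvFold_eq (corpus : String) (test : String → Bool) (anchors : List String)
    (h : ∀ a ∈ anchors, ∀ w ∈ pvWordsB a, PySem.Str.isIn w corpus = test w) :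
    anchors.foldl (fun acc anchor =>
      let words := ((PySem.Str.split₀ anchor).filter (fun w => 3 ≤ PySem.Str.len w)).map PySem.Str.lower
      if words = [] then (acc.1, acc.2 ++ [anchor])
      else
        let mc := words.countP (fun w => PySem.Str.isIn w corpus)
        if 3 * words.length ≤ 5 * mc then (acc.1 ++ [anchor], acc.2)
        else (acc.1, acc.2 ++ [anchor])) (([], []) : List String × List String)
    = (anchors.zip (anchors.map pvWordsB)).foldl (fun acc p =>
      if p.2 ≠ [] ∧ 3 * p.2.length ≤ 5 * p.2.countP (fun w => test w)
      then (acc.1 ++ [p.1], acc.2)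
      else (acc.1, acc.2 ++ [p.1])) ([], []) := by
  rw [← List.map_prod_left_eq_zip, List.foldl_map]
  apply PySem.List.foldl_congr_mem
  intro acc a ha
  have hcount : ((pvWordsB a).countP (fun w => PySem.Str.isIn w corpus))
      = (pvWordsB a).countP (fun w => test w) :=
    List.countP_congr (fun w hwm => by rw [h a ha w hwm])
  simp only [pvWordsB] at hcount
  simp only []
  rw [hcount]
  by_cases hnil : ((PySem.Str.split₀ a).filter (fun w => 3 ≤ PySem.Str.len w)).map PySem.Str.lower = []
  · rw [if_pos hnil, if_neg (fun hcl => hcl.1 (by simpa only [pvWordsB] using hnil))]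
  · simp only [if_neg hnil]
    by_cases hge : 3 * (((PySem.Str.split₀ a).filter (fun w => 3 ≤ PySem.Str.len w)).map PySem.Str.lower).length
        ≤ 5 * ((((PySem.Str.split₀ a).filter (fun w => 3 ≤ PySem.Str.len w)).map PySem.Str.lower).countP (fun w => test w))
    · rw [if_pos hge, if_pos ⟨hnil, hge⟩]
    · rw [if_neg hge, if_neg (by tauto)]

-- ===== VERDICT (by name: the statement is the Claim_ definition above) =====
-- B's parts list, flattened on .toList
theorem pvParts_toList (qs : List (List (String × String))) (init : List String) :
    ((qs.foldl (fun acc q => acc ++ [pvPieceQ q] ++ [pvPieceE q]) init).map String.toList).flatten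
    = (init.map String.toList).flatten
      ++ (qs.map (fun q => (pvPieceQ q).toList ++ (pvPieceE q).toList)).flatten := by
  induction qs generalizing init with
  | nil => simp
  | cons q qs ih => rw [List.foldl_cons, ih]; simp

-- ===== VERDICT (by name: the statement is the Claim_ definition above) =====
theorem classify_anchors_spec : Claim_equal_classify_anchors := by
  intro anchors questions _
  unfold Spec_classify_anchors classify_anchors classify_anchors_alt
  split_ifs with h1 h2
  · rfl
  · rfl
  show _ = pvClassifyLoop (anchors.zip (anchors.map pvWordsB)) _
  -- name the two corpora
  set cA : String := questions.foldl (fun acc q =>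
      acc ++ " " ++ PySem.Str.lower (PySem.Dict.getD (PySem.Dict.mk q) "question" "")
          ++ " " ++ PySem.Str.lower (PySem.Dict.getD (PySem.Dict.mk q) "explanation" "")) "" with hcA
  set cB : String := PySem.Str.join ""
      (questions.foldl (fun acc q => acc ++ [pvPieceQ q] ++ [pvPieceE q]) []) with hcB
  have hcorp : cA.toList = cB.toList := by
    rw [hcA, hcB, pvJoin_nil_toList, pvCorpusA_toList, pvParts_toList]
    simp
  unfold pvClassifyLoop
  apply pvFold_eq
  intro a ha w hw
  -- the word's length is one of the indexed lengths
  have hmem : PySem.Str.len w ∈ (anchors.map pvWordsB).flatMap (fun ws => ws.map PySem.Str.len) :=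
    List.mem_flatMap.mpr ⟨pvWordsB a, List.mem_map_of_mem ha, List.mem_map_of_mem hw⟩
  rw [pvGetD_indexFold, if_pos ((PySem.Set.mem_ofList _ _).mpr hmem), pvContains_substrs]
  simp only [PySem.Str.isIn_eq, hcorp]
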